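-- pv_equiv track=rewrite | github.com/pypi-data/pypi-mirror-98 | packages/openstuder-client/openstuder_client-0.3.0-py3-none-any.whl/openstuder.py | decode_frame
-- ===== SOURCE A (Python) =====
-- from typing import Callable, Optional, Tuple, List
--
-- class SIProtocolError(IOError):
--     """
--     Class for reporting all OpenStuder protocol errors.
--     """
--
--     def __init__(self, message):
--         super(SIProtocolError, self).__init__(message)
--
--     def reason(self) -> str:
--         """
--         Returns the actual reason for the error.
--
--         :return: Reason for the error.
--         """
--         return super(SIProtocolError, self).args[0]
--
-- def decode_frame(frame: str) -> Tuple[str, dict, str]: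
--     lines = frame.split('\n')
--
--     if len(lines) < 2:
--         raise SIProtocolError('invalid frame')
--
--     command = lines[0]
--
--     line = 1
--     headers = {}
--     while line < len(lines) and lines[line]:
--         components = lines[line].split(':')
--         if len(components) >= 2:
--             headers[components[0]] = ':'.join(components[1:])
--         line += 1
--     line += 1
--
--     if line >= len(lines):
--         raise SIProtocolError('invalid frame')
--
--     body = '\n'.join(lines[line:])
--
--     return command, headers, body
-- ===== SOURCE B (Python) =====
-- class SIProtocolError(IOError):
--     """
--     Class for reporting all OpenStuder protocol errors.
--     """
--
--     def __init__(self, message):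
--         super(SIProtocolError, self).__init__(message)
--
--     def reason(self) -> str:
--         return super(SIProtocolError, self).args[0]
--
--
-- def decode_frame(frame: str):
--     lines = frame.split('\n')
--
--     if len(lines) < 2:
--         raise SIProtocolError('invalid frame')
--
--     # Locate the blank separator line first, then slice the frame apart.
--     try:
--         sep = lines[1:].index('') + 1
--     except ValueError:
--         raise SIProtocolError('invalid frame')
--
--     if sep + 1 >= len(lines):
--         raise SIProtocolError('invalid frame')
--
--     headers = {}
--     for line in lines[1:sep]:
--         key, *rest = line.split(':')
--         if rest:
--             headers[key] = ':'.join(rest)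
--
--     return lines[0], headers, '\n'.join(lines[sep + 1:])
-- ===== Notes on version B (the rewrite author's own statement) =====
-- stated objective: simpler
-- what changed: B first locates the blank separator line with lines[1:].index('') and then slices the frame into command, header block and body, instead of A's single stateful scan that advances a line counter while parsing headers and infers the raise conditions from leftover loop state.
-- outside the precondition, e.g. on decode_frame('CMD\nonly-headers\n'): A raises SIProtocolError, B raises SIProtocolError; on decode_frame('no-newline'): A raises SIProtocolError, B raises SIProtocolError
import Mathlib
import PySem

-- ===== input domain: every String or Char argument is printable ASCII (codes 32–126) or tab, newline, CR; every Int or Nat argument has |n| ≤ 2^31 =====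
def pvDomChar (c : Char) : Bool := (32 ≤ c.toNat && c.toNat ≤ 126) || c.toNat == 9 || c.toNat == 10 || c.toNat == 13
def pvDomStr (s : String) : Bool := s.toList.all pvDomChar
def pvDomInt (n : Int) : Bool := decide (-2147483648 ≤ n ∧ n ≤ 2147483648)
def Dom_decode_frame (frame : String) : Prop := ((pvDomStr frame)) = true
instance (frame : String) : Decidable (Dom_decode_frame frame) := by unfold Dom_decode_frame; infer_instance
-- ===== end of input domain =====

-- B locates the blank separator line first and then slices the frame into command, header
-- block and body, instead of A's single stateful scan with a line counter (objective: simpler).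
-- Both Pythons raise SIProtocolError on malformed frames; those inputs are outside Pre_.

-- ===== PORT A =====
-- A's while loop: scan lines from index 1 while non-empty, collecting headers;
-- returns (headers, lines remaining after the blank line / end of list).
def aScanA : List String → PySem.Dict String String → PySem.Dict String String × List String
  | [], headers => (headers, [])
  | l :: rest, headers =>
    if l = "" then (headers, rest)
    else
      let components := (PySem.Str.split? l ":").getD []
      aScanA rest
        (if 2 ≤ components.length then
          headers.insert (components.headD "") (PySem.Str.join ":" (components.drop 1))
        else headers)

def decode_frame (frame : String) : String × (List (String × String)) × String :=
  let lines := (PySem.Str.split? frame "\n").getD []   -- '\n' ≠ '', split never raises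
  if lines.length < 2 then ("", [], "")                -- raise SIProtocolError (outside Pre_)
  else
    let command := lines.headD ""
    match aScanA (lines.drop 1) PySem.Dict.empty with
    | (headers, rest) =>
      -- rest = [] exactly when line+1 >= len(lines) in A: raise (outside Pre_)
      if rest = [] then ("", [], "")
      else (command, headers.items, PySem.Str.join "\n" rest)

-- ===== PORT B =====
def decode_frame_alt (frame : String) : String × (List (String × String)) × String :=
  let lines := (PySem.Str.split? frame "\n").getD []
  if lines.length < 2 then ("", [], "")                -- raise (outside Pre_)
  else
    match PySem.List.index? (PySem.List.slice lines (some 1) none) "" with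
    | none => ("", [], "")                             -- ValueError → raise (outside Pre_)
    | some i =>
      let sep := i + 1
      if lines.length ≤ sep + 1 then ("", [], "")      -- raise (outside Pre_)
      else
        let headers := (PySem.List.slice lines (some 1) (some (sep : Int))).foldl
          (fun h line =>
            let comps := (PySem.Str.split? line ":").getD []
            if comps.drop 1 ≠ [] then
              h.insert (comps.headD "") (PySem.Str.join ":" (comps.drop 1))
            else h)
          PySem.Dict.empty
        (lines.headD "", headers.items,
          PySem.Str.join "\n" (PySem.List.slice lines (some ((sep : Int) + 1)) none))

-- ===== PRECONDITION & SPEC =====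
-- Pre_ holds exactly when the frame, split on '\n', has an empty line after the command
-- line that is not the last line: elsewhere A (and B) raise SIProtocolError.
def Pre_decode_frame (frame : String) : Prop :=
  "" ∈ ((((PySem.Str.split? frame "\n").getD []).drop 1).dropLast)
instance (frame : String) : Decidable (Pre_decode_frame frame) := by
  unfold Pre_decode_frame; infer_instance

def pvWitness_decode_frame : String := "CMD\nA:1\n\nbody"

def Spec_decode_frame (frame : String) (out : String × (List (String × String)) × String) : Prop := out = decode_frame_alt frame
instance (frame : String) (out : String × (List (String × String)) × String) : Decidable (Spec_decode_frame frame out) := by unfold Spec_decode_frame; infer_instance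

-- ===== CLAIM (what is proved, stated in full; the proofs are below) =====
def Claim_equal_decode_frame : Prop := ∀ (frame : String), Dom_decode_frame frame → Pre_decode_frame frame → Spec_decode_frame frame (decode_frame frame)

-- ===== LEMMAS AND PROOFS =====

-- the two per-line header steps agree: len(comps) >= 2 iff comps[1:] nonempty
theorem pv_step_eq (h : PySem.Dict String String) (l : String) :
    (if ((PySem.Str.split? l ":").getD []).drop 1 ≠ [] then
       h.insert (((PySem.Str.split? l ":").getD []).headD "")
         (PySem.Str.join ":" (((PySem.Str.split? l ":").getD []).drop 1))
     else h)
    = (if 2 ≤ ((PySem.Str.split? l ":").getD []).length then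
         h.insert (((PySem.Str.split? l ":").getD []).headD "")
           (PySem.Str.join ":" (((PySem.Str.split? l ":").getD []).drop 1))
       else h) := by
  have hiff : (((PySem.Str.split? l ":").getD []).drop 1 ≠ [])
      ↔ 2 ≤ ((PySem.Str.split? l ":").getD []).length := by
    rw [ne_eq, List.drop_eq_nil_iff]
    omega
  by_cases hc : 2 ≤ ((PySem.Str.split? l ":").getD []).length
  · rw [if_pos (hiff.2 hc), if_pos hc]
  · rw [if_neg (fun hne => hc (hiff.1 hne)), if_neg hc]

-- A's scan, characterised by the first index of the empty line
theorem pv_aScanA_eq (t : List String) (k : Nat) (hd : PySem.Dict String String)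
    (hk : PySem.List.index? t "" = some k) :
    aScanA t hd =
      ((t.take k).foldl
        (fun headers l =>
          if 2 ≤ ((PySem.Str.split? l ":").getD []).length then
            headers.insert (((PySem.Str.split? l ":").getD []).headD "")
              (PySem.Str.join ":" (((PySem.Str.split? l ":").getD []).drop 1))
          else headers) hd,
       t.drop (k + 1)) := by
  induction t generalizing k hd with
  | nil => simp [PySem.List.index?_eq_idxOf?] at hk
  | cons x rest ih =>
    by_cases hx : x = ""
    · subst hx
      rw [PySem.List.index?_cons_self] at hk
      obtain rfl : (0 : Nat) = k := Option.some.inj hk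
      simp [aScanA]
    · rw [PySem.List.index?_cons_of_ne rest hx] at hk
      cases h' : PySem.List.index? rest "" with
      | none => rw [h'] at hk; simp at hk
      | some m =>
        rw [h'] at hk
        simp only [Option.map_some] at hk
        obtain rfl : m + 1 = k := Option.some.inj hk
        simp only [aScanA, hx, List.take_succ_cons, List.foldl_cons, List.drop_succ_cons]
        exact ih m _ h'

-- the whole equivalence, at the level of the shared list of lines
theorem pv_core (lines : List String) (hpre : "" ∈ (lines.drop 1).dropLast) :
    (if lines.length < 2 then (("", [], "") : String × (List (String × String)) × String)
     else
       if (aScanA (lines.drop 1) PySem.Dict.empty).2 = [] then ("", [], "")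
       else (lines.headD "", (aScanA (lines.drop 1) PySem.Dict.empty).1.items,
             PySem.Str.join "\n" (aScanA (lines.drop 1) PySem.Dict.empty).2))
    =
    (if lines.length < 2 then ("", [], "")
     else
       match PySem.List.index? (PySem.List.slice lines (some 1) none) "" with
       | none => ("", [], "")
       | some i =>
         if lines.length ≤ (i + 1) + 1 then ("", [], "")
         else
           (lines.headD "",
            ((PySem.List.slice lines (some 1) (some ((i + 1 : Nat) : Int))).foldl
              (fun h line =>
                if ((PySem.Str.split? line ":").getD []).drop 1 ≠ [] then
                  h.insert (((PySem.Str.split? line ":").getD []).headD "")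
                    (PySem.Str.join ":" (((PySem.Str.split? line ":").getD []).drop 1))
                else h)
              PySem.Dict.empty).items,
            PySem.Str.join "\n" (PySem.List.slice lines (some (((i + 1 : Nat) : Int) + 1)) none))) := by
  have hmem : "" ∈ lines.drop 1 := List.mem_of_mem_dropLast hpre
  obtain ⟨k, hk⟩ := Option.isSome_iff_exists.1
    ((PySem.List.index?_isSome_iff (lines.drop 1) "").2 hmem)
  obtain ⟨hklt, hkval, hkmin⟩ := PySem.List.getElem_of_index?_eq_some hk
  obtain ⟨j, hj, hjval⟩ := List.mem_iff_getElem.1 hpre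
  rw [List.length_dropLast] at hj
  rw [List.getElem_dropLast] at hjval
  have hkj : k ≤ j := by
    by_contra hlt
    exact hkmin j (by omega) hjval
  have hdl : (lines.drop 1).length = lines.length - 1 := List.length_drop
  have hk1 : k + 1 < (lines.drop 1).length := by omega
  have hlen : 3 ≤ lines.length := by omega
  have hslice1 : PySem.List.slice lines (some 1) none = lines.drop 1 := by
    rw [PySem.List.slice_from lines (by norm_num : (0:Int) ≤ 1)]
    norm_num
  have hsliceH : PySem.List.slice lines (some (1 : Int)) (some ((k + 1 : Nat) : Int))
      = (lines.drop 1).take k := by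
    have h' := PySem.List.slice_natCast lines 1 (k + 1)
    simpa using h'
  have hsliceB : PySem.List.slice lines (some (((k + 1 : Nat) : Int) + 1)) none
      = lines.drop (k + 2) := by
    rw [PySem.List.slice_from lines (by omega : (0:Int) ≤ ((k + 1 : Nat) : Int) + 1)]
    congr 1
  have hrest : (aScanA (lines.drop 1) PySem.Dict.empty).2 = (lines.drop 1).drop (k + 1) := by
    rw [pv_aScanA_eq (lines.drop 1) k _ hk]
  have hheads : (aScanA (lines.drop 1) PySem.Dict.empty).1 =
      ((lines.drop 1).take k).foldl
        (fun headers l =>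
          if 2 ≤ ((PySem.Str.split? l ":").getD []).length then
            headers.insert (((PySem.Str.split? l ":").getD []).headD "")
              (PySem.Str.join ":" (((PySem.Str.split? l ":").getD []).drop 1))
          else headers) PySem.Dict.empty := by
    rw [pv_aScanA_eq (lines.drop 1) k _ hk]
  have hne : ¬ ((lines.drop 1).drop (k + 1) = []) := by
    rw [List.drop_eq_nil_iff]
    omega
  have hdrop : (lines.drop 1).drop (k + 1) = lines.drop (k + 2) := by
    rw [List.drop_drop]
    congr 1
    omega
  have h2' : ¬ (lines.length < 2) := by omega
  rw [if_neg h2', if_neg h2', hrest, hheads, if_neg hne, hslice1, hk]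
  dsimp only
  rw [if_neg (show ¬ (lines.length ≤ k + 1 + 1) by omega), hsliceH, hsliceB]
  have hfold : ((lines.drop 1).take k).foldl
      (fun (h : PySem.Dict String String) line =>
        if ((PySem.Str.split? line ":").getD []).drop 1 ≠ [] then
          h.insert (((PySem.Str.split? line ":").getD []).headD "")
            (PySem.Str.join ":" (((PySem.Str.split? line ":").getD []).drop 1))
        else h)
      PySem.Dict.empty
      = ((lines.drop 1).take k).foldl
      (fun (headers : PySem.Dict String String) l =>
        if 2 ≤ ((PySem.Str.split? l ":").getD []).length then
          headers.insert (((PySem.Str.split? l ":").getD []).headD "")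
            (PySem.Str.join ":" (((PySem.Str.split? l ":").getD []).drop 1))
        else headers)
      PySem.Dict.empty :=
    PySem.List.foldl_congr_mem _ _ _ _ (fun acc x _ => pv_step_eq acc x)
  rw [hfold, hdrop]

-- ===== VERDICT (by name: the statement is the Claim_ definition above) =====
theorem decode_frame_spec : Claim_equal_decode_frame := by
  intro frame _ hpre
  unfold Pre_decode_frame at hpre
  exact pv_core ((PySem.Str.split? frame "\n").getD []) hpre
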